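-- pv_equiv track=rewrite | github.com/newnamelsl/project | text_enroll_md-share_clean/preprocess/aishell2_kespeech_mandarin/cut_head_100_1channel_100k_aishell/aishell_100k_word_seg/version_kaldi_ipa/forced_alignment_cut/data_process/cut_datalist_by_timestamp.py | process_utterance_batch_timestamp
-- ===== SOURCE A (Python) =====
-- def process_utterance_batch_timestamp(args):
--     """
--     批量处理多个utterance的timestamp生成，减少进程间通信开销
--     """
--     batch_tasks, c_timestamp_dict = args
--     batch_results = []
--
--     for uttid, utt_datalist_dict in batch_tasks:
--         if uttid in c_timestamp_dict:
--             c_timestamp = c_timestamp_dict[uttid]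
--             segment_label = utt_datalist_dict["segment_label"]
--             seg_len_list = [len(seg) for seg in segment_label]
--             seg_timestamp_list = []
--             i = 0
--             for sl in seg_len_list:
--                 seg_ts = c_timestamp[i:i+sl]
--                 seg_timestamp_list.append(seg_ts)
--                 i += sl
--             batch_results.append((uttid, seg_timestamp_list))
--         else:
--             batch_results.append((uttid, None))
--
--     return batch_results
-- ===== SOURCE B (Python) =====
-- def process_utterance_batch_timestamp(args):
--     """
--     Scatter variant: instead of slicing the timestamp list, label every
--     timestamp position with the index of the segment it belongs to, then
--     distribute the timestamps into per-segment buckets in one zip pass.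
--     Correct because positions are labelled in order, so bucket k receives
--     exactly the contiguous run that A's k-th slice takes (zip truncation
--     matches Python slice clamping when the timestamp list is short).
--     """
--     batch_tasks, c_timestamp_dict = args
--     batch_results = []
--
--     for uttid, utt_datalist_dict in batch_tasks:
--         if uttid in c_timestamp_dict:
--             segment_label = utt_datalist_dict["segment_label"]
--             labels = [k for k, seg in enumerate(segment_label) for _ in seg]
--             buckets = [[] for _ in segment_label]
--             for k, ts in zip(labels, c_timestamp_dict[uttid]):
--                 buckets[k].append(ts)
--             batch_results.append((uttid, buckets))
--         else:
--             batch_results.append((uttid, None))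
--
--     return batch_results
-- ===== Notes on version B (the rewrite author's own statement) =====
-- stated objective: alternative
-- what changed: Replaces A's running-index slicing loop by a scatter algorithm: every timestamp position gets a segment-index label via enumerate, and one zip pass distributes the timestamps into pre-allocated per-segment buckets (no slicing, no running offset).
-- outside the precondition, e.g. on process_utterance_batch_timestamp(([('u', {})], {'u': [1, 2]})): A raises KeyError, B raises KeyError
import Mathlib
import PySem

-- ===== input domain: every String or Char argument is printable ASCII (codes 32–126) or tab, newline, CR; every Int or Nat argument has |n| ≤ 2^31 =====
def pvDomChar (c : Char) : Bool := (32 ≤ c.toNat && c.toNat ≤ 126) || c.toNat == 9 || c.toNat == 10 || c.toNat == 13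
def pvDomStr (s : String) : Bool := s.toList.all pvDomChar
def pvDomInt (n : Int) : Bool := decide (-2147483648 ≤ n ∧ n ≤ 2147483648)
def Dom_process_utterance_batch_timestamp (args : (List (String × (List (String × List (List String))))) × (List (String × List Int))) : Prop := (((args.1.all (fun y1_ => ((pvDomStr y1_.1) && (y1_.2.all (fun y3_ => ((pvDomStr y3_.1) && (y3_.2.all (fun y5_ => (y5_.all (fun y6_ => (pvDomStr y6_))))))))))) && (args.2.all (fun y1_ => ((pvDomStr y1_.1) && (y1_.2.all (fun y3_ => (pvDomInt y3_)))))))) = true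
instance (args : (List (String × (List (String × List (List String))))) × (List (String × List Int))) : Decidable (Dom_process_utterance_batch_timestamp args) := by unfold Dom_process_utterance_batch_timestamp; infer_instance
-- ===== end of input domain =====

-- B replaces A's running-index slicing loop by a scatter: each timestamp position is labelled
-- with its segment index and one zip pass distributes timestamps into per-segment buckets
-- (objective: alternative algorithm, same cost).

-- ===== PORT A =====
-- A's inner loop: thread a running index i, appending c_timestamp[i:i+sl] for each segment length sl.
def pvAInner (c_timestamp : List Int) (seg_len_list : List Int) : List (List Int) :=
  (seg_len_list.foldl
    (fun (st : List (List Int) × Int) sl =>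
      (st.1 ++ [PySem.List.slice c_timestamp (some st.2) (some (st.2 + sl))], st.2 + sl))
    (([] : List (List Int)), (0 : Int))).1

-- A's per-utterance body ('utt_datalist_dict["segment_label"]' raises KeyError when absent;
-- Pre_ excludes that, here it defaults to []).
def pvAStep (c_timestamp_dict : List (String × List Int))
    (batch_results : List (String × Option (List (List Int))))
    (task : String × (List (String × List (List String)))) :
    List (String × Option (List (List Int))) :=
  match c_timestamp_dict.lookup task.1 with
  | some c_timestamp =>
      let segment_label := (task.2.lookup "segment_label").getD []
      let seg_len_list := segment_label.map (fun seg => (seg.length : Int))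
      batch_results ++ [(task.1, some (pvAInner c_timestamp seg_len_list))]
  | none => batch_results ++ [(task.1, none)]

def process_utterance_batch_timestamp (args : (List (String × (List (String × List (List String))))) × (List (String × List Int))) : List (String × Option (List (List Int))) :=
  args.1.foldl (pvAStep args.2) []

-- ===== PORT B =====
-- B's per-utterance body: label every timestamp position with its segment index
-- (enumerate + replication), then scatter the zipped (label, timestamp) pairs into
-- pre-allocated buckets. Labels are enumerate indices, hence ≥ 0, so '.toNat' is exact here.
def pvBStep (c_timestamp_dict : List (String × List Int))
    (batch_results : List (String × Option (List (List Int))))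
    (task : String × (List (String × List (List String)))) :
    List (String × Option (List (List Int))) :=
  match c_timestamp_dict.lookup task.1 with
  | some c_timestamp =>
      let segment_label := (task.2.lookup "segment_label").getD []
      let labels := (PySem.List.enumerate segment_label 0).flatMap
        (fun p => List.replicate p.2.length p.1)
      let buckets0 := segment_label.map (fun _ => ([] : List Int))
      let buckets := (labels.zip c_timestamp).foldl
        (fun (b : List (List Int)) (p : Int × Int) => b.modify p.1.toNat (fun l => l ++ [p.2]))
        buckets0
      batch_results ++ [(task.1, some buckets)]
  | none => batch_results ++ [(task.1, none)]

def process_utterance_batch_timestamp_alt (args : (List (String × (List (String × List (List String))))) × (List (String × List Int))) : List (String × Option (List (List Int))) :=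
  args.1.foldl (pvBStep args.2) []

-- ===== PRECONDITION & SPEC =====
-- Pre_ excludes exactly the inputs where Python A raises KeyError: a task whose uttid is in the
-- timestamp dict but whose datalist dict has no "segment_label" key.
def Pre_process_utterance_batch_timestamp (args : (List (String × (List (String × List (List String))))) × (List (String × List Int))) : Prop :=
  ∀ task ∈ args.1, (args.2.lookup task.1).isSome → (task.2.lookup "segment_label").isSome
instance (args : (List (String × (List (String × List (List String))))) × (List (String × List Int))) : Decidable (Pre_process_utterance_batch_timestamp args) := by unfold Pre_process_utterance_batch_timestamp; infer_instance

def pvWitness_process_utterance_batch_timestamp : ((List (String × (List (String × List (List String))))) × (List (String × List Int))) :=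
  ([("u", [("segment_label", [["a"], ["b", "c"]])]), ("v", [])], [("u", [1, 2, 3, 4])])

def Spec_process_utterance_batch_timestamp (args : (List (String × (List (String × List (List String))))) × (List (String × List Int))) (out : List (String × Option (List (List Int)))) : Prop := out = process_utterance_batch_timestamp_alt args
instance (args : (List (String × (List (String × List (List String))))) × (List (String × List Int))) (out : List (String × Option (List (List Int)))) : Decidable (Spec_process_utterance_batch_timestamp args out) := by unfold Spec_process_utterance_batch_timestamp; infer_instance

-- ===== CLAIM (what is proved, stated in full; the proofs are below) =====
def Claim_equal_process_utterance_batch_timestamp : Prop := ∀ (args : (List (String × (List (String × List (List String))))) × (List (String × List Int))), Dom_process_utterance_batch_timestamp args → Pre_process_utterance_batch_timestamp args → Spec_process_utterance_batch_timestamp args (process_utterance_batch_timestamp args)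

-- ===== LEMMAS AND PROOFS =====

-- reference spec both inner algorithms are reduced to: cut cts into pieces of the given lengths.
def pvCut (cts : List Int) : List Nat → List (List Int)
  | [] => []
  | n :: L => cts.take n :: pvCut (cts.drop n) L

-- Nat-indexed enumeration (proof-side mirror of PySem.List.enumerate).
def pvNatEnum {α : Type} : List α → Nat → List (Nat × α)
  | [], _ => []
  | x :: xs, s => (s, x) :: pvNatEnum xs (s + 1)

lemma pvEnum_natCast {α : Type} : ∀ (xs : List α) (s : Nat),
    PySem.List.enumerate xs (s : Int) = (pvNatEnum xs s).map (fun p => ((p.1 : Int), p.2)) := by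
  intro xs
  induction xs with
  | nil => intro s; simp [pvNatEnum, PySem.List.enumerate_nil]
  | cons x xs ih =>
      intro s
      rw [PySem.List.enumerate_cons, pvNatEnum]
      have : ((s : Int) + 1) = ((s + 1 : Nat) : Int) := by push_cast; ring
      rw [this, ih (s + 1)]
      simp

lemma pvNatEnum_shift {α : Type} : ∀ (xs : List α) (s : Nat),
    pvNatEnum xs (s + 1) = (pvNatEnum xs s).map (fun p => (p.1 + 1, p.2)) := by
  intro xs
  induction xs with
  | nil => intro s; simp [pvNatEnum]
  | cons x xs ih => intro s; simp [pvNatEnum, ih (s + 1)]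

def pvNatLabels (segs : List (List String)) : List Nat :=
  (pvNatEnum segs 0).flatMap (fun p => List.replicate p.2.length p.1)

-- the Nat-level scatter step
def pvStep' (b : List (List Int)) (p : Nat × Int) : List (List Int) :=
  b.modify p.1 (fun l => l ++ [p.2])

lemma pvZip_append {α β : Type} : ∀ (l1 l2 : List α) (ts : List β),
    (l1 ++ l2).zip ts = l1.zip ts ++ l2.zip (ts.drop l1.length) := by
  intro l1
  induction l1 with
  | nil => intro l2 ts; simp
  | cons x l1 ih =>
      intro l2 ts
      cases ts with
      | nil => simp
      | cons t ts => simp [ih l2 ts]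

lemma pvFold_replicate : ∀ (n : Nat) (ts : List Int) (b0 : List Int) (bs : List (List Int)),
    ((List.replicate n 0).zip ts).foldl pvStep' (b0 :: bs) = (b0 ++ ts.take n) :: bs := by
  intro n
  induction n with
  | zero => intro ts b0 bs; simp
  | succ n ih =>
      intro ts b0 bs
      cases ts with
      | nil => simp
      | cons t ts =>
          rw [List.replicate_succ]
          simp only [List.zip_cons_cons, List.foldl_cons]
          rw [show pvStep' (b0 :: bs) (0, t) = (b0 ++ [t]) :: bs from by
            simp [pvStep', List.modify]]
          rw [ih ts (b0 ++ [t]) bs]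
          simp

lemma pvFold_shift : ∀ (L : List Nat) (ts : List Int) (b0 : List Int) (bs : List (List Int)),
    ((L.map (· + 1)).zip ts).foldl pvStep' (b0 :: bs)
      = b0 :: (L.zip ts).foldl pvStep' bs := by
  intro L
  induction L with
  | nil => intro ts b0 bs; simp
  | cons k L ih =>
      intro ts b0 bs
      cases ts with
      | nil => simp
      | cons t ts =>
          simp only [List.map_cons, List.zip_cons_cons, List.foldl_cons]
          rw [show pvStep' (b0 :: bs) (k + 1, t) = b0 :: pvStep' bs (k, t) from by
            simp [pvStep', List.modify]]
          exact ih ts b0 (pvStep' bs (k, t))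

lemma pvNatLabels_cons (seg : List String) (rest : List (List String)) :
    pvNatLabels (seg :: rest)
      = List.replicate seg.length 0 ++ (pvNatLabels rest).map (· + 1) := by
  unfold pvNatLabels
  rw [pvNatEnum, pvNatEnum_shift rest 0]
  simp [List.flatMap_cons, List.flatMap_map, List.map_flatMap, List.map_replicate]

-- B's scatter computes the cut.
lemma pvScatter_eq : ∀ (segs : List (List String)) (cts : List Int),
    ((pvNatLabels segs).zip cts).foldl pvStep' (segs.map (fun _ => ([] : List Int)))
      = pvCut cts (segs.map (fun s => s.length)) := by
  intro segs
  induction segs with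
  | nil => intro cts; simp [pvNatLabels, pvNatEnum, pvCut]
  | cons seg rest ih =>
      intro cts
      rw [pvNatLabels_cons, pvZip_append, List.foldl_append, List.map_cons,
        pvFold_replicate seg.length cts [] _, List.length_replicate, List.nil_append,
        pvFold_shift, List.map_cons, pvCut, ih (cts.drop seg.length)]

-- A's running-index fold computes the cut.
lemma pvAInner_cut (cts : List Int) : ∀ (segs : List (List String)) (i : Nat) (acc : List (List Int)),
    ((segs.map (fun seg => (seg.length : Int))).foldl
      (fun (st : List (List Int) × Int) sl =>
        (st.1 ++ [PySem.List.slice cts (some st.2) (some (st.2 + sl))], st.2 + sl))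
      (acc, (i : Int))).1
    = acc ++ pvCut (cts.drop i) (segs.map (fun s => s.length)) := by
  intro segs
  induction segs with
  | nil => intro i acc; simp [pvCut]
  | cons seg rest ih =>
      intro i acc
      simp only [List.map_cons, List.foldl_cons]
      rw [PySem.List.slice_natCast_add cts i seg.length,
        show ((i : Int) + (seg.length : Int)) = ((i + seg.length : Nat) : Int) from by push_cast; ring,
        ih (i + seg.length) (acc ++ [List.take seg.length (List.drop i cts)])]
      simp [pvCut, List.drop_drop]

-- per-utterance: A's step equals B's step.
lemma pvStep_eq (cdict : List (String × List Int))
    (acc : List (String × Option (List (List Int))))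
    (task : String × (List (String × List (List String)))) :
    pvAStep cdict acc task = pvBStep cdict acc task := by
  unfold pvAStep pvBStep
  cases h : cdict.lookup task.1 with
  | none => rfl
  | some cts =>
      simp only
      congr 2
      set segs := (task.2.lookup "segment_label").getD [] with hsegs
      -- A side → pvCut
      unfold pvAInner
      rw [show (0 : Int) = ((0 : Nat) : Int) from rfl, pvAInner_cut cts segs 0 []]
      -- B side → pvCut
      rw [pvEnum_natCast segs 0]
      rw [List.flatMap_map]
      rw [show (fun a : Nat × List String => List.replicate ((a.1 : Int), a.2).2.length ((a.1 : Int), a.2).1)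
          = fun p : Nat × List String => (List.replicate p.2.length p.1).map (fun k : Nat => (k : Int)) from by
            funext p; simp [List.map_replicate]]
      rw [← List.map_flatMap]
      rw [List.zip_map_left, List.foldl_map]
      rw [show (fun (x : List (List Int)) (y : Nat × Int) =>
          x.modify (Prod.map (fun k : Nat => (k : Int)) id y).1.toNat
            (fun l => l ++ [(Prod.map (fun k : Nat => (k : Int)) id y).2])) = pvStep' from by
        funext b p; simp [pvStep', Prod.map]]
      rw [← pvNatLabels, pvScatter_eq segs cts]
      simp

-- the outer loops agree.
lemma pvFold_eq (cdict : List (String × List Int))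
    (tasks : List (String × (List (String × List (List String))))) :
    ∀ acc, tasks.foldl (pvAStep cdict) acc = tasks.foldl (pvBStep cdict) acc := by
  induction tasks with
  | nil => intro acc; rfl
  | cons t ts ih => intro acc; simp only [List.foldl_cons, pvStep_eq, ih]

-- ===== VERDICT (by name: the statement is the Claim_ definition above) =====
theorem process_utterance_batch_timestamp_spec : Claim_equal_process_utterance_batch_timestamp := by
  intro args _ _
  unfold Spec_process_utterance_batch_timestamp process_utterance_batch_timestamp process_utterance_batch_timestamp_alt
  exact pvFold_eq args.2 args.1 []
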